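-- pv_equiv track=rewrite | github.com/prabik98/codechef | starters104/1.py | find_min_sum
-- ===== SOURCE A (Python) =====
-- def gcd(x, y):
--     if y == 0:
--         return x
--     return gcd(y, x % y)
--
-- def lcm(x, y):
--     return x * y // gcd(x, y)
--
-- def find_min_sum(x, y , k):
--     for _ in range(k):
--         if x > y:
--             x = gcd(x, y)
--             y = lcm(x, y)
--         else:
--             y = gcd(x, y)
--             x = lcm(x, y)
--     return x + y
-- ===== SOURCE B (Python) =====
-- # B: one loop iteration of A replaces one coordinate by the (sign-following) gcd,
-- # and the state is a fixed point after two iterations; so apply at most two such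
-- # steps instead of looping k times (the gcd/lcm recomputation cancels algebraically).
-- def _g(a, b):
--     while b:
--         a, b = b, a % b
--     return a
--
-- def _step(x, y):
--     d = _g(x, y)
--     return (d, y) if x > y else (x, d)
--
-- def find_min_sum(x, y, k):
--     if k >= 1:
--         x, y = _step(x, y)
--     if k >= 2:
--         x, y = _step(x, y)
--     return x + y
-- ===== Notes on version B (the rewrite author's own statement) =====
-- stated objective: faster
-- what changed: A loops k times recomputing gcd and lcm; B uses the facts that one iteration just replaces one coordinate by the sign-following gcd (the lcm cancels) and that the state is a fixed point after two iterations, so it performs at most two gcd steps regardless of k.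
-- crash fix: On x = 0, y = 0, k >= 1 A raises ZeroDivisionError inside lcm; B returns 0. — e.g. on find_min_sum(0, 0, 1): A raises ZeroDivisionError, B returns 0
import Mathlib
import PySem

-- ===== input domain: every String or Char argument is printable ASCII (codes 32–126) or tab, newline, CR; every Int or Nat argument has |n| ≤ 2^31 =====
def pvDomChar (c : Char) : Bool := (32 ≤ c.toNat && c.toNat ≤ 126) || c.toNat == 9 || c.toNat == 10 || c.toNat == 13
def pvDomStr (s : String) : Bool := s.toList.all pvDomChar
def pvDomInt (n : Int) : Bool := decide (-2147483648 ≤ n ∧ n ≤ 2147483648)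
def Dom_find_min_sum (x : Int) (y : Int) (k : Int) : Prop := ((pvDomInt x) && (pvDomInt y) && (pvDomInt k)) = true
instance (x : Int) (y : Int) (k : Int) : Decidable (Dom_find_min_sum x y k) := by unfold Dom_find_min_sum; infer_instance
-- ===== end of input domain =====

-- B replaces A's k-iteration gcd/lcm loop by at most two gcd steps (the state is a
-- fixed point after two iterations of A's loop body).

-- termination helper for both gcd ports (Python's % follows the divisor's sign)
theorem pv_mod_natAbs_lt (x y : Int) (hy : y ≠ 0) : (PySem.Int.mod x y).natAbs < y.natAbs := by
  rcases lt_trichotomy y 0 with h | h | h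
  · have := PySem.Int.mod_neg_bounds x h
    omega
  · exact absurd h hy
  · have h1 := PySem.Int.mod_nonneg x h
    have h2 := PySem.Int.mod_lt x h
    omega

-- ===== PORT A =====
-- A's recursive gcd: if y == 0: return x; return gcd(y, x % y)
def gcdA (x y : Int) : Int :=
  if h : y = 0 then x else gcdA y (PySem.Int.mod x y)
termination_by y.natAbs
decreasing_by exact pv_mod_natAbs_lt x y h
-- A's lcm: x * y // gcd(x, y)
def lcmA (x y : Int) : Int := PySem.Int.floordiv (x * y) (gcdA x y)
-- A's loop body
def stepA (p : Int × Int) : Int × Int :=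
  if p.1 > p.2 then
    let x := gcdA p.1 p.2
    (x, lcmA x p.2)
  else
    let y := gcdA p.1 p.2
    (lcmA p.1 y, y)
def find_min_sum (x : Int) (y : Int) (k : Int) : Int :=
  let p := (PySem.List.pyRange 0 k 1).foldl (fun p _ => stepA p) (x, y)
  p.1 + p.2

-- ===== PORT B =====
-- B's iterative gcd: while b: a, b = b, a % b; return a
def gcdB (a b : Int) : Int :=
  if h : b = 0 then a else gcdB b (PySem.Int.mod a b)
termination_by b.natAbs
decreasing_by exact pv_mod_natAbs_lt a b h
-- B's _step: d = _g(x, y); return (d, y) if x > y else (x, d)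
def stepB (p : Int × Int) : Int × Int :=
  let d := gcdB p.1 p.2
  if p.1 > p.2 then (d, p.2) else (p.1, d)
def find_min_sum_alt (x : Int) (y : Int) (k : Int) : Int :=
  let p := if 1 ≤ k then stepB (x, y) else (x, y)
  let q := if 2 ≤ k then stepB p else p
  q.1 + q.2

-- ===== PRECONDITION & SPEC =====
-- Pre_ excludes exactly x = 0 ∧ y = 0 ∧ k ≥ 1, the only inputs where A raises (ZeroDivisionError in lcm).
def Pre_find_min_sum (x : Int) (y : Int) (k : Int) : Prop := ¬(x = 0 ∧ y = 0 ∧ 1 ≤ k)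
instance (x : Int) (y : Int) (k : Int) : Decidable (Pre_find_min_sum x y k) := by unfold Pre_find_min_sum; infer_instance
def pvWitness_find_min_sum : Int × Int × Int := (6, 4, 3)

-- On x = 0, y = 0, k >= 1 A raises ZeroDivisionError inside lcm; B returns 0.
def Raises_find_min_sum (x : Int) (y : Int) (k : Int) : Prop := x = 0 ∧ y = 0 ∧ 1 ≤ k
instance (x : Int) (y : Int) (k : Int) : Decidable (Raises_find_min_sum x y k) := by unfold Raises_find_min_sum; infer_instance
def pvRaiseWitness_find_min_sum : Int × Int × Int := (0, 0, 1)
def pvRaiseWitnessOut_find_min_sum : Int := 0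

def Spec_find_min_sum (x : Int) (y : Int) (k : Int) (out : Int) : Prop := out = find_min_sum_alt x y k
instance (x : Int) (y : Int) (k : Int) (out : Int) : Decidable (Spec_find_min_sum x y k out) := by unfold Spec_find_min_sum; infer_instance

-- ===== CLAIM (what is proved, stated in full; the proofs are below) =====
def Claim_equal_find_min_sum : Prop := ∀ (x : Int) (y : Int) (k : Int), Dom_find_min_sum x y k → Pre_find_min_sum x y k → Spec_find_min_sum x y k (find_min_sum x y k)
def Claim_raises_find_min_sum : Prop := (∀ (x : Int) (y : Int) (k : Int), Dom_find_min_sum x y k → Raises_find_min_sum x y k → ¬ Pre_find_min_sum x y k) ∧ (Dom_find_min_sum (pvRaiseWitness_find_min_sum.1) (pvRaiseWitness_find_min_sum.2.1) (pvRaiseWitness_find_min_sum.2.2) ∧ Raises_find_min_sum (pvRaiseWitness_find_min_sum.1) (pvRaiseWitness_find_min_sum.2.1) (pvRaiseWitness_find_min_sum.2.2) ∧ find_min_sum_alt (pvRaiseWitness_find_min_sum.1) (pvRaiseWitness_find_min_sum.2.1) (pvRaiseWitness_find_min_sum.2.2) = pvRaiseWitnessOut_find_min_sum)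

-- ===== LEMMAS AND PROOFS =====
theorem gcdA_zero (x : Int) : gcdA x 0 = x := by rw [gcdA]; simp
theorem gcdB_eq_gcdA (x y : Int) : gcdB x y = gcdA x y := by
  fun_induction gcdA x y
  case case1 => rename_i a; rw [gcdB]; simp
  case case2 => rename_i a b h ih; rw [gcdB]; simp only [h, dite_false]; exact ih
theorem gcdA_spec (x y : Int) (hy : y ≠ 0) :
    gcdA x y = if y < 0 then -((Int.gcd x y : Nat) : Int) else ((Int.gcd x y : Nat) : Int) := by
  induction hn : y.natAbs using Nat.strong_induction_on generalizing x y with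
  | _ n ih =>
    subst hn
    rw [gcdA]; simp only [hy, dite_false]
    set m := PySem.Int.mod x y with hm
    have hgcd : Int.gcd y m = Int.gcd x y := by
      have hq := PySem.Int.floordiv_mul_add_mod x y
      have : m = x - (PySem.Int.floordiv x y) * y := by omega
      rw [this, Int.gcd_sub_mul_right_right, Int.gcd_comm]
    by_cases hm0 : m = 0
    · have hdvd : y ∣ x := (PySem.Int.mod_eq_zero_iff_dvd x y).mp hm0
      have hg : Int.gcd x y = y.natAbs := by
        rw [Int.gcd_comm]; exact Int.gcd_eq_natAbs_left hdvd
      rw [hm0, gcdA_zero, hg]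
      rcases lt_trichotomy y 0 with h | h | h
      · rw [if_pos h]; omega
      · exact absurd h hy
      · rw [if_neg (by omega)]; omega
    · have hlt : m.natAbs < y.natAbs := pv_mod_natAbs_lt x y hy
      have hsign : (m < 0 ↔ y < 0) := by
        rcases lt_trichotomy y 0 with h | h | h
        · have := PySem.Int.mod_neg_bounds x h
          constructor
          · intro _; exact h
          · intro _; omega
        · exact absurd h hy
        · have := PySem.Int.mod_nonneg x h
          constructor <;> intro <;> omega
      rw [ih m.natAbs hlt y m hm0 rfl, hgcd]
      by_cases h : y < 0
      · rw [if_pos (hsign.mpr h), if_pos h]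
      · rw [if_neg (fun hc => h (hsign.mp hc)), if_neg h]
theorem gcdA_natAbs (x y : Int) (hy : y ≠ 0) : (gcdA x y).natAbs = Int.gcd x y := by
  rw [gcdA_spec x y hy]; split <;> simp
theorem gcdA_ne_zero (x y : Int) (hy : y ≠ 0) : gcdA x y ≠ 0 := by
  have h1 := gcdA_natAbs x y hy
  have : Int.gcd x y ≠ 0 := fun hc => hy (Int.gcd_eq_zero_iff.mp hc).2
  omega
theorem gcdA_neg_iff (x y : Int) (hy : y ≠ 0) : gcdA x y < 0 ↔ y < 0 := by
  have h1 := gcdA_natAbs x y hy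
  have h2 := gcdA_ne_zero x y hy
  rw [gcdA_spec x y hy] at *
  constructor <;> intro h
  · by_contra hc; rw [if_neg hc] at h; omega
  · rw [if_pos h]; omega
theorem gcdA_absorb_right (a g : Int) (hg : g ≠ 0) (hd : g.natAbs ∣ a.natAbs) : gcdA a g = g := by
  rw [gcdA_spec a g hg]
  have h : Int.gcd a g = g.natAbs := Nat.gcd_eq_right hd
  rw [h]
  by_cases hl : g < 0
  · rw [if_pos hl]; omega
  · rw [if_neg hl]; omega
theorem gcdA_absorb_left (g b : Int) (hb : b ≠ 0) (hd : g.natAbs ∣ b.natAbs)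
    (hs : g < 0 ↔ b < 0) (hg : g ≠ 0) : gcdA g b = g := by
  rw [gcdA_spec g b hb]
  have h : Int.gcd g b = g.natAbs := Nat.gcd_eq_left hd
  rw [h]
  by_cases hl : b < 0
  · rw [if_pos hl]; have := hs.mpr hl; omega
  · rw [if_neg hl]; have : ¬ g < 0 := fun hc => hl (hs.mp hc); omega
theorem floordiv_mul_cancel (d c : Int) (hd : d ≠ 0) : PySem.Int.floordiv (d * c) d = c := by
  have hmod : PySem.Int.mod (d * c) d = 0 := (PySem.Int.mod_eq_zero_iff_dvd _ _).mpr ⟨c, rfl⟩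
  have h := PySem.Int.floordiv_mul_add_mod (d * c) d
  rw [hmod, add_zero] at h
  have h2 : PySem.Int.floordiv (d * c) d * d = c * d := by rw [h]; ring
  exact mul_right_cancel₀ hd h2
theorem stepA_eq_stepB (p : Int × Int) : stepA p = stepB p := by
  obtain ⟨a, b⟩ := p
  simp only [stepA, stepB, gcdB_eq_gcdA]
  by_cases hab : a > b <;> simp only [hab, if_true, if_false, lcmA]
  · by_cases hb : b = 0
    · subst hb
      have ha : a ≠ 0 := by omega
      rw [gcdA_zero, gcdA_zero, mul_zero]
      have h := floordiv_mul_cancel a 0 ha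
      rw [mul_zero] at h
      rw [h]
    · have hgne := gcdA_ne_zero a b hb
      have hgd : (gcdA a b).natAbs ∣ b.natAbs := by
        rw [gcdA_natAbs a b hb]; exact Int.gcd_dvd_natAbs_right a b
      rw [gcdA_absorb_left (gcdA a b) b hb hgd (gcdA_neg_iff a b hb) hgne,
          floordiv_mul_cancel (gcdA a b) b hgne]
  · by_cases hgz : gcdA a b = 0
    · have hb : b = 0 := by by_contra hb; exact gcdA_ne_zero a b hb hgz
      have ha : a = 0 := by rw [hb, gcdA_zero] at hgz; exact hgz
      subst ha; subst hb
      rw [hgz]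
      decide
    · have hgd : (gcdA a b).natAbs ∣ a.natAbs := by
        by_cases hb : b = 0
        · rw [hb, gcdA_zero]
        · rw [gcdA_natAbs a b hb]; exact Int.gcd_dvd_natAbs_left a b
      rw [gcdA_absorb_right a (gcdA a b) hgz hgd, mul_comm, floordiv_mul_cancel (gcdA a b) a hgz]
theorem gcdA_of_dvd (a b : Int) (hb : b ≠ 0) (h : b ∣ a) : gcdA a b = b := by
  rw [gcdA_spec a b hb]
  have hg : Int.gcd a b = b.natAbs := by rw [Int.gcd_comm]; exact Int.gcd_eq_natAbs_left h
  rw [hg]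
  by_cases hl : b < 0
  · rw [if_pos hl]; omega
  · rw [if_neg hl]; omega
theorem gcdA_self (a : Int) (ha : a ≠ 0) : gcdA a a = a :=
  gcdA_absorb_right a a ha dvd_rfl
theorem stepB_fix_of_dvd (p : Int × Int) (h : p.1 ∣ p.2 ∨ p.2 ∣ p.1) :
    stepB (stepB p) = stepB p := by
  obtain ⟨a, b⟩ := p
  simp only [stepB, gcdB_eq_gcdA] at h ⊢
  by_cases hab : a > b <;> simp only [hab, if_true, if_false]
  · -- first step gives (gcdA a b, b)
    by_cases hb : b = 0
    · subst hb
      have ha : 0 < a := by omega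
      rw [gcdA_zero]
      simp only [hab, if_true, gcdA_zero]
    · have hgne := gcdA_ne_zero a b hb
      have hgabs : (gcdA a b).natAbs = Int.gcd a b := gcdA_natAbs a b hb
      have hsign := gcdA_neg_iff a b hb
      by_cases hbneg : b < 0
      · -- b < 0, g < 0, |g| ≤ |b|, so g ≥ b
        have hgd : (gcdA a b).natAbs ∣ b.natAbs := by
          rw [hgabs]; exact Int.gcd_dvd_natAbs_right a b
        have habs : (gcdA a b).natAbs ≤ b.natAbs := Nat.le_of_dvd (by omega) hgd
        by_cases hgb : gcdA a b > b
        · simp only [hgb, if_true]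
          rw [gcdA_absorb_left (gcdA a b) b hb hgd hsign hgne]
        · have hgeb : gcdA a b = b := by
            have := hsign.mpr hbneg
            omega
          rw [hgeb]
          simp only [lt_irrefl, if_false]
          rw [gcdA_self b hb]
      · -- b > 0 (b ≠ 0): then b ∣ a forced, so g = b
        have hbpos : 0 < b := by omega
        have hba : b ∣ a := by
          rcases h with h | h
          · exact absurd (Int.le_of_dvd hbpos h) (by omega)
          · exact h
        have hgb : gcdA a b = b := gcdA_of_dvd a b hb hba
        rw [hgb]
        simp only [lt_irrefl, if_false]
        rw [gcdA_self b hb]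
  · -- first step gives (a, gcdA a b)
    by_cases hb : b = 0
    · subst hb
      rw [gcdA_zero]
      simp only [lt_irrefl, if_false]
      by_cases ha : a = 0
      · subst ha; rw [gcdA_zero]
      · rw [gcdA_self a ha]
    · by_cases hba : b ∣ a
      · have hgb : gcdA a b = b := gcdA_of_dvd a b hb hba
        rw [hgb]
        simp only [hab, if_false]
        rw [hgb]
      · have hadb : a ∣ b := h.resolve_right hba
        have ha : a ≠ 0 := by rintro rfl; exact hba (dvd_zero b)
        have hgabs : (gcdA a b).natAbs = Int.gcd a b := gcdA_natAbs a b hb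
        have hG : Int.gcd a b = a.natAbs := Int.gcd_eq_natAbs_left hadb
        by_cases hbneg : b < 0
        · -- a ≤ b < 0 → a < 0 → g = a
          have hga : gcdA a b = a := by
            rw [gcdA_spec a b hb, hG, if_pos hbneg]
            omega
          rw [hga]
          simp only [lt_irrefl, if_false]
          rw [gcdA_self a ha]
        · -- b > 0 → g = |a| > 0 ≥ ... a ≤ g always
          have hga : gcdA a b = ((a.natAbs : Nat) : Int) := by
            rw [gcdA_spec a b hb, hG, if_neg hbneg]
          have hnotgt : ¬ a > gcdA a b := by rw [hga]; omega
          simp only [hnotgt, if_false]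
          congr 1
          have hgne := gcdA_ne_zero a b hb
          exact gcdA_absorb_right a (gcdA a b) hgne (by rw [hgabs, hG])

theorem stepB_dvd (p : Int × Int) :
    (stepB p).1 ∣ (stepB p).2 ∨ (stepB p).2 ∣ (stepB p).1 := by
  obtain ⟨a, b⟩ := p
  simp only [stepB, gcdB_eq_gcdA]
  have hdvd : gcdA a b ∣ a ∧ gcdA a b ∣ b := by
    by_cases hb : b = 0
    · subst hb; rw [gcdA_zero]; exact ⟨dvd_refl a, dvd_zero a⟩
    · rw [gcdA_spec a b hb]
      constructor <;> split
      · simp only [Int.neg_dvd]; exact Int.gcd_dvd_left a b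
      · exact Int.gcd_dvd_left a b
      · simp only [Int.neg_dvd]; exact Int.gcd_dvd_right a b
      · exact Int.gcd_dvd_right a b
  by_cases hab : a > b
  · simp only [hab, if_true]
    exact Or.inl hdvd.2
  · simp only [hab, if_false]
    exact Or.inr hdvd.1

theorem stepB_three (p : Int × Int) : stepB (stepB (stepB p)) = stepB (stepB p) :=
  stepB_fix_of_dvd (stepB p) (stepB_dvd p)

theorem foldl_fix (l : List Int) (p : Int × Int) (h : stepB p = p) :
    l.foldl (fun q _ => stepB q) p = p := by
  induction l with
  | nil => rfl
  | cons a l ih => simp only [List.foldl_cons, h, ih]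

theorem foldl_two (l : List Int) (p : Int × Int) (h : 2 ≤ l.length) :
    l.foldl (fun q _ => stepB q) p = stepB (stepB p) := by
  match l with
  | a :: b :: l2 =>
    simp only [List.foldl_cons]
    exact foldl_fix l2 (stepB (stepB p)) (stepB_three p)

-- ===== VERDICT (by name: the statement is the Claim_ definition above) =====
theorem find_min_sum_spec : Claim_equal_find_min_sum := by
  intro x y k _ _
  unfold Spec_find_min_sum find_min_sum find_min_sum_alt
  have hfun : (fun (p : Int × Int) (_ : Int) => stepA p) = (fun p _ => stepB p) := by
    funext p _; exact stepA_eq_stepB p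
  rw [hfun]
  rcases lt_trichotomy k 1 with hk | hk | hk
  · rw [PySem.List.pyRange_one_eq_nil (by omega)]
    simp [not_le.mpr hk, show ¬ (2:Int) ≤ k by omega]
  · subst hk
    rw [PySem.List.pyRange_one_cons (by norm_num), PySem.List.pyRange_one_eq_nil (by norm_num)]
    simp
  · have hlen : 2 ≤ (PySem.List.pyRange 0 k 1).length := by
      rw [PySem.List.length_pyRange_one]; omega
    rw [foldl_two _ _ hlen]
    simp [show (1:Int) ≤ k by omega, show (2:Int) ≤ k by omega]

@[simp] theorem find_min_sum_raises : Claim_raises_find_min_sum := by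
  unfold Claim_raises_find_min_sum
  refine ⟨?_, by decide, by decide, ?_⟩
  · intro x y k _ hr
    unfold Pre_find_min_sum
    simp [hr.1, hr.2.1, hr.2.2]
  · show find_min_sum_alt 0 0 1 = 0
    simp [find_min_sum_alt, stepB, gcdB_eq_gcdA, gcdA_zero]
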